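-- pv_equiv track=rewrite | github.com/marwilsondc/string_manipulation_batch_6 | center_alternative.py | center_alt
-- ===== SOURCE A (Python) =====
-- def center_alt(str, length, char = " "):
--
--     #within function, initialize alternator = True, left_padding = "", and right_padding = ""
--     alternator = True
--     left_padding = ""
--     right_padding = ""
--
--     #subtract len(str) from len, store in pad_range
--     pad_range = length - len(str)
--
--     #then create a for loop iterating through range(len - len(str))
--     for i in range(pad_range):
--
--         #then create an if statement, if alternator is True, add char to left_padding and set alternator to False
--         if alternator:
--             left_padding += char
--             alternator = False
--             continue
--
--         #if alternator is False, add char to right_padding and set alternator to True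
--         if alternator == False:
--             right_padding += char
--             alternator = True
--             continue
--
--     #outside for loop, combine left_padding + str + right_padding, store in result
--     result = left_padding + str + right_padding
--
--     #return result
--     return result
-- ===== SOURCE B (Python) =====
-- def center_alt(str, length, char = " "):
--     pad = length - len(str)
--     return char * ((pad + 1) // 2) + str + char * (pad // 2)
-- ===== Notes on version B (the rewrite author's own statement) =====
-- stated objective: simpler
-- what changed: Replaced the alternating-toggle loop over range(pad) with a closed-form count: the left padding is char repeated ceil(pad/2) times and the right padding char repeated floor(pad/2) times.
import Mathlib
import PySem

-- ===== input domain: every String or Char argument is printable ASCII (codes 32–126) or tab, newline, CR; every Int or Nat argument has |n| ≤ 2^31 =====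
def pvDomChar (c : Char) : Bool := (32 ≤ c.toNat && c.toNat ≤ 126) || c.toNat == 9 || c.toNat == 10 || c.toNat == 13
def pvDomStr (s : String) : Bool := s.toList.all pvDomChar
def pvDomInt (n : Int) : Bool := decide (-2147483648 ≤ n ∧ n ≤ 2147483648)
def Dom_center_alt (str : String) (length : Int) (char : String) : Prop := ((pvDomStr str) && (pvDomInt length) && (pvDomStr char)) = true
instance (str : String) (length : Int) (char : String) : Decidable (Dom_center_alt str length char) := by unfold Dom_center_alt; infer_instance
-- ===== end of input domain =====

-- B replaces A's alternating-toggle padding loop with a closed-form count (ceil/floor halves of the pad).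


-- ===== PORT A =====
-- literal transliteration: toggle flag, two accumulated paddings, loop over range(pad_range)
def center_alt (str : String) (length : Int) (char : String) : String :=
  let pad_range := length - PySem.Str.len str
  let st := (PySem.List.pyRange 0 pad_range 1).foldl
    (fun (st : Bool × List Char × List Char) _ =>
      if st.1 then (false, st.2.1 ++ char.toList, st.2.2)
      else (true, st.2.1, st.2.2 ++ char.toList))
    (true, [], [])
  String.ofList (st.2.1 ++ str.toList ++ st.2.2)

-- ===== PORT B =====
-- char * n  (n : Int; empty for n ≤ 0, exactly as in Python)
def pyStrMul (c : List Char) (n : Int) : List Char := (List.replicate n.toNat c).flatten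

def center_alt_alt (str : String) (length : Int) (char : String) : String :=
  let pad := length - PySem.Str.len str
  String.ofList (pyStrMul char.toList (PySem.Int.floordiv (pad + 1) 2) ++ str.toList
             ++ pyStrMul char.toList (PySem.Int.floordiv pad 2))

-- ===== PRECONDITION & SPEC =====
def Spec_center_alt (str : String) (length : Int) (char : String) (out : String) : Prop := out = center_alt_alt str length char
instance (str : String) (length : Int) (char : String) (out : String) : Decidable (Spec_center_alt str length char out) := by unfold Spec_center_alt; infer_instance

-- ===== CLAIM (what is proved, stated in full; the proofs are below) =====
def Claim_equal_center_alt : Prop := ∀ (str : String) (length : Int) (char : String), Dom_center_alt str length char → Spec_center_alt str length char (center_alt str length char)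

-- ===== LEMMAS AND PROOFS =====

-- A's loop over range(n) ends with flag = even n, left = ceil(n/2) copies, right = floor(n/2) copies
theorem center_alt_loop (c : List Char) (n : Nat) :
    (PySem.List.pyRange 0 (n : Int) 1).foldl
      (fun (st : Bool × List Char × List Char) _ =>
        if st.1 then (false, st.2.1 ++ c, st.2.2)
        else (true, st.2.1, st.2.2 ++ c))
      (true, [], []) =
    (decide (n % 2 = 0), (List.replicate ((n + 1) / 2) c).flatten,
      (List.replicate (n / 2) c).flatten) := by
  induction n with
  | zero => simp
  | succ n ih =>
    have h : ((n : Int) + 1) = ((n + 1 : Nat) : Int) := by push_cast; ring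
    rw [← h, PySem.List.pyRange_one_succ_right (by positivity), List.foldl_append, ih]
    simp only [List.foldl_cons, List.foldl_nil]
    rcases Nat.even_or_odd n with he | ho
    · obtain ⟨k, hk⟩ := he
      subst hk
      have h1 : (k + k) % 2 = 0 := by omega
      have h2 : (k + k + 1 + 1) / 2 = (k + k + 1) / 2 + 1 := by omega
      have h3 : (k + k + 1) % 2 ≠ 0 := by omega
      have h4 : (k + k) / 2 = (k + k + 1) / 2 := by omega
      simp [h1, h2, h3, h4, List.replicate_succ', List.flatten_append]
    · obtain ⟨k, hk⟩ := ho
      subst hk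
      have h1 : (2 * k + 1) % 2 ≠ 0 := by omega
      have h2 : (2 * k + 1 + 1) % 2 = 0 := by omega
      have h3 : (2 * k + 1 + 1) / 2 = (2 * k + 1) / 2 + 1 := by omega
      have h4 : (2 * k + 1 + 1 + 1) / 2 = (2 * k + 1 + 1) / 2 := by omega
      simp [h2, h3, h4, List.replicate_succ', List.flatten_append]

-- ===== VERDICT (by name: the statement is the Claim_ definition above) =====
theorem center_alt_spec : Claim_equal_center_alt := by
  intro str length char _
  unfold Spec_center_alt center_alt center_alt_alt pyStrMul
  simp only
  set pad := length - PySem.Str.len str with hpad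
  rcases le_or_gt 0 pad with hp | hp
  · obtain ⟨n, hn⟩ := Int.eq_ofNat_of_zero_le hp
    rw [hn, center_alt_loop]
    have h1 : PySem.Int.floordiv ((n : Int) + 1) 2 = ((n + 1 : Nat) / 2 : Nat) := by
      rw [show ((n : Int) + 1) = ((n + 1 : Nat) : Int) by push_cast; ring]
      exact_mod_cast PySem.Int.floordiv_natCast (n + 1) 2
    have h2 : PySem.Int.floordiv (n : Int) 2 = ((n / 2 : Nat) : Int) := by
      exact_mod_cast PySem.Int.floordiv_natCast n 2
    have h1' : (((n : Int) + 1) / 2).toNat = (n + 1) / 2 := by omega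
    have h2' : ((n : Int) / 2).toNat = n / 2 := by omega
    simp [h1', h2']
  · have h0 : PySem.List.pyRange 0 pad 1 = [] := PySem.List.pyRange_one_eq_nil (by omega)
    rw [h0]
    have h1' : ((pad + 1) / 2).toNat = 0 := by omega
    have h2' : (pad / 2).toNat = 0 := by omega
    simp [h1', h2']
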